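-- pv_equiv track=rewrite | github.com/ird/scratch2 | even_fib.py | largest_even_fib
-- ===== SOURCE A (Python) =====
-- def largest_even_fib(limit):
--     """ given a limit, find the largest even fibonacci number below that limit,
--     and the fibonacci number before it. Returned as a dict {'largest_even', 'previous'}"""
--     results = {'largest_even': 0, 'previous': 0}
--     largest = [0, 0, 0, 0]  # there is an even fib number every 3rd in the sequence
--     a, b = 0, 1 # calculate the fib numbers inline rather than using a generator
--     while True:
--         i = a+b
--         largest[3] = largest[2]
--         largest[2] = largest[1]
--         largest[1] = largest[0]
--         largest[0] = i
--         a, b = b, i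
--         if i >= limit:
--             break
--     for n in range(3):
--         if largest[n] % 2 == 0:
--             results['largest_even'] = largest[n]
--             results['previous'] = largest[n+1]
--             break
--     return results
-- ===== SOURCE B (Python) =====
-- def largest_even_fib(limit):
--     """ given a limit, find the largest even fibonacci number below that limit,
--     and the fibonacci number before it. Returned as a dict {'largest_even', 'previous'}"""
--     even, before = 0, 0
--     prev, cur = 1, 1
--     while True:
--         if cur % 2 == 0:
--             even, before = cur, prev
--         if cur >= limit:
--             break
--         prev, cur = cur, prev + cur
--     return {'largest_even': even, 'previous': before}
-- ===== Notes on version B (the rewrite author's own statement) =====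
-- stated objective: simpler
-- what changed: Replaces A's 4-slot history buffer plus a separate post-loop parity scan with a single loop that tracks the last even Fibonacci pair (value, predecessor) as it goes, returning it directly.
import Mathlib
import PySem

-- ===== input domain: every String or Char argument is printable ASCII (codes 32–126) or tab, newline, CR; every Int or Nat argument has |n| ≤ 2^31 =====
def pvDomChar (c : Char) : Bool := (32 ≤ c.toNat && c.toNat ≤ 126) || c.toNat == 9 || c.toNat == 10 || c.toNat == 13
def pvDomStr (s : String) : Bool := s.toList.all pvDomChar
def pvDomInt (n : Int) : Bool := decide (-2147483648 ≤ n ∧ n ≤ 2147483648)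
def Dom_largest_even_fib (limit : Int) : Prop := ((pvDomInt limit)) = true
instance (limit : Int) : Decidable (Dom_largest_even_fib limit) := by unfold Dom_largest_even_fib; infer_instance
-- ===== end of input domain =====

-- B replaces A's 4-slot history buffer + post-loop parity scan by single-pass tracking
-- of the last even Fibonacci pair (objective: simpler).

-- ===== PORT A =====
-- A's 'while True' loop; fuel 64 stands for the unbounded Python loop (i ≥ limit is
-- reached after < 64 iterations for every |limit| ≤ 2^31, since fib grows past 2^31 there).
-- The 4-element Python list 'largest' is carried as a 4-tuple (fixed length 4 throughout).
def lefLoopA : Nat → Int → Int → (Int × Int × Int × Int) → Int → (Int × Int × Int × Int)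
  | 0, _, _, l, _ => l
  | f+1, a, b, (l0, l1, l2, _l3), limit =>
    let i := a + b
    let l' := (i, l0, l1, l2)      -- the four shift assignments largest[3..0]
    if i ≥ limit then l' else lefLoopA f b i l' limit

-- the 'for n in range(3)' scan with break, unrolled (range(3) is literal);
-- results starts as {'largest_even': 0, 'previous': 0} and keys are only overwritten,
-- so insertion order is always [largest_even, previous].
def lefScan : (Int × Int × Int × Int) → List (String × Int)
  | (m0, m1, m2, m3) =>
    if PySem.Int.mod m0 2 = 0 then [("largest_even", m0), ("previous", m1)]
    else if PySem.Int.mod m1 2 = 0 then [("largest_even", m1), ("previous", m2)]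
    else if PySem.Int.mod m2 2 = 0 then [("largest_even", m2), ("previous", m3)]
    else [("largest_even", 0), ("previous", 0)]

def largest_even_fib (limit : Int) : List (String × Int) :=
  lefScan (lefLoopA 64 0 1 (0, 0, 0, 0) limit)

-- ===== PORT B =====
-- B's single loop; same fuel convention as A's loop (same iteration count on Dom).
def lefLoopB : Nat → Int → Int → Int → Int → Int → Int × Int
  | 0, _, _, even, before, _ => (even, before)
  | f+1, prev, cur, even, before, limit =>
    let p := if PySem.Int.mod cur 2 = 0 then (cur, prev) else (even, before)
    if cur ≥ limit then p else lefLoopB f cur (prev + cur) p.1 p.2 limit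

def largest_even_fib_alt (limit : Int) : List (String × Int) :=
  let p := lefLoopB 64 1 1 0 0 limit
  [("largest_even", p.1), ("previous", p.2)]

-- ===== PRECONDITION & SPEC =====
def Spec_largest_even_fib (limit : Int) (out : List (String × Int)) : Prop := out = largest_even_fib_alt limit
instance (limit : Int) (out : List (String × Int)) : Decidable (Spec_largest_even_fib limit out) := by unfold Spec_largest_even_fib; infer_instance

-- ===== CLAIM (what is proved, stated in full; the proofs are below) =====
def Claim_equal_largest_even_fib : Prop := ∀ (limit : Int), Dom_largest_even_fib limit → Spec_largest_even_fib limit (largest_even_fib limit)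

-- ===== LEMMAS AND PROOFS =====

-- PySem.Int.mod with divisor 2 is Lean's % (positive divisor)
lemma lefMod2 (a : Int) : PySem.Int.mod a 2 = a % 2 :=
  PySem.Int.mod_eq_emod_of_pos (by norm_num)

-- one-step unfoldings of the two loops
lemma lefLoopA_succ (f : Nat) (a b l0 l1 l2 l3 limit : Int) :
    lefLoopA (f+1) a b (l0, l1, l2, l3) limit =
      if a + b ≥ limit then (a + b, l0, l1, l2)
      else lefLoopA f b (a + b) (a + b, l0, l1, l2) limit := rfl

lemma lefLoopB_succ (f : Nat) (prev cur even before limit : Int) :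
    lefLoopB (f+1) prev cur even before limit =
      (let p := if PySem.Int.mod cur 2 = 0 then (cur, prev) else (even, before)
       if cur ≥ limit then p else lefLoopB f cur (prev + cur) p.1 p.2 limit) := rfl

-- what A's post-loop scan extracts from the buffer, as a pair
def lefEscan (m0 m1 m2 m3 : Int) : Int × Int :=
  if m0 % 2 = 0 then (m0, m1)
  else if m1 % 2 = 0 then (m1, m2)
  else if m2 % 2 = 0 then (m2, m3)
  else (0, 0)

lemma lefScan_eq (m0 m1 m2 m3 : Int) :
    lefScan (m0, m1, m2, m3) =
      [("largest_even", (lefEscan m0 m1 m2 m3).1), ("previous", (lefEscan m0 m1 m2 m3).2)] := by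
  simp only [lefScan, lefEscan, lefMod2]
  split_ifs <;> rfl

-- Loop invariant lemma: with the last pushed value b in slot 0, B's (ev,bf) equal to
-- the scan of the current buffer, and the parity fact that a+b, b, l1 are never all
-- odd, the scanned result of A's remaining loop equals B's remaining loop started at
-- prev = b, cur = a + b.
lemma lef_loop_eq (f : Nat) :
    ∀ (a b l1 l2 l3 ev bf limit : Int),
      (ev, bf) = lefEscan b l1 l2 l3 →
      ((a + b) % 2 ≠ 0 → b % 2 ≠ 0 → l1 % 2 = 0) →
      lefScan (lefLoopA f a b (b, l1, l2, l3) limit) =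
        [("largest_even", (lefLoopB f b (a + b) ev bf limit).1),
         ("previous", (lefLoopB f b (a + b) ev bf limit).2)] := by
  induction f with
  | zero =>
    intro a b l1 l2 l3 ev bf limit hesc _
    rw [show lefLoopA 0 a b (b, l1, l2, l3) limit = (b, l1, l2, l3) from rfl,
        show lefLoopB 0 b (a+b) ev bf limit = (ev, bf) from rfl, lefScan_eq, ← hesc]
  | succ f ih =>
    intro a b l1 l2 l3 ev bf limit hesc hpar
    rw [lefLoopA_succ, lefLoopB_succ]
    simp only [lefMod2]
    have hnew : (if (a + b) % 2 = 0 then (a + b, b) else (ev, bf)) = lefEscan (a+b) b l1 l2 := by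
      by_cases hev : (a + b) % 2 = 0
      · simp [lefEscan, hev]
      · rw [if_neg hev, hesc]
        by_cases hb : b % 2 = 0
        · simp [lefEscan, hev, hb]
        · have hl1 : l1 % 2 = 0 := hpar hev hb
          simp [lefEscan, hev, hb, hl1]
    by_cases hge : a + b ≥ limit
    · simp only [if_pos hge, lefScan_eq, hnew]
    · simp only [if_neg hge]
      have := ih b (a + b) b l1 l2 (lefEscan (a+b) b l1 l2).1 (lefEscan (a+b) b l1 l2).2 limit
        (by rfl) (by intro h1 h2; omega)
      rw [hnew]
      simpa using this

-- ===== VERDICT (by name: the statement is the Claim_ definition above) =====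
theorem largest_even_fib_spec : Claim_equal_largest_even_fib := by
  intro limit _
  unfold Spec_largest_even_fib largest_even_fib largest_even_fib_alt
  -- unroll the first iteration of each loop (i = cur = 1, odd)
  have hA : lefLoopA 64 0 1 (0,0,0,0) limit =
      if (1:Int) ≥ limit then ((1:Int),0,0,0) else lefLoopA 63 1 1 (1,0,0,0) limit := by
    have := lefLoopA_succ 63 0 1 0 0 0 0 limit
    norm_num at this; exact this
  have hB : lefLoopB 64 1 1 0 0 limit =
      if (1:Int) ≥ limit then ((0:Int),(0:Int)) else lefLoopB 63 1 2 0 0 limit := by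
    have := lefLoopB_succ 63 1 1 0 0 limit
    rw [lefMod2] at this
    norm_num at this; exact this
  rw [hA, hB]
  by_cases hge : (1:Int) ≥ limit
  · rw [if_pos hge, if_pos hge, lefScan_eq]
    simp [lefEscan]
  · rw [if_neg hge, if_neg hge]
    have := lef_loop_eq 63 1 1 0 0 0 0 0 limit (by decide) (by intro h; omega)
    norm_num at this
    exact this
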